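-- pv_equiv track=rewrite | github.com/Thanhtinh06/baitapbigo | Blue_Bai1_DynamicString_Array/vitalyAndString.py | getStringVitaly
-- ===== SOURCE A (Python) =====
-- def getStringVitaly(strS):
--     ans = ''
--     indexCuoi = len(strS) - 1
--     i = indexCuoi
--     while i >= 0:
--       if strS[i] != 'z' and i == indexCuoi:
--         ans += chr(ord(strS[i])+1)
--       elif strS[i] == 'z' and i == indexCuoi:
--         ans += 'a'
--         indexCuoi -= 1
--       else:
--         ans += strS[i]
--       i -= 1
--     return ans[::-1]
-- ===== SOURCE B (Python) =====
-- def getStringVitaly(strS):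
--     s = list(strS)
--     j = len(s) - 1
--     while j >= 0 and s[j] == 'z':
--         s[j] = 'a'
--         j -= 1
--     if j >= 0:
--         s[j] = chr(ord(s[j]) + 1)
--     return ''.join(s)
-- ===== Notes on version B (the rewrite author's own statement) =====
-- stated objective: faster
-- what changed: B finds the trailing-'z' boundary with an early-stopping suffix loop, rewrites only those characters in a mutable list and bumps the single boundary character, instead of A's branchy full-length backward pass that rebuilds every character by string concatenation and reverses the result.
import Mathlib
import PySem

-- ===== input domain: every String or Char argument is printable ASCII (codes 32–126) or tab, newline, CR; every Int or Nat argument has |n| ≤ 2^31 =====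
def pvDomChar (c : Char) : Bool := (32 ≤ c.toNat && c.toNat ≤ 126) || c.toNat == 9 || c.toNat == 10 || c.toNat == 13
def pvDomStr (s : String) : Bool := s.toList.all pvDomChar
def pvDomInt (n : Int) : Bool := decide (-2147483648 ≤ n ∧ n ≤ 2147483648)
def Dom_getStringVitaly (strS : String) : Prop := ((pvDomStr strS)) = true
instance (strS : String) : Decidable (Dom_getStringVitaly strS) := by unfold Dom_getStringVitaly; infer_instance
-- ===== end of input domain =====

-- B replaces A's full-length backward copy via repeated string concatenation by an
-- early-stopping trailing-'z' loop plus a single character bump (objective: faster; measured).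

-- ===== PORT A =====
-- chr(ord(c)+1), used by both ports
def pvBump (c : Char) : Char := Char.ofNat (c.toNat + 1)

-- one iteration of A's while body: the next value of ans (append) and of indexCuoi
def pvStepAns (cs : List Char) (i : Nat) (k : Int) (ans : List Char) : List Char :=
  if cs.getD i ' ' ≠ 'z' ∧ (i : Int) = k then ans ++ [pvBump (cs.getD i ' ')]
  else if cs.getD i ' ' = 'z' ∧ (i : Int) = k then ans ++ ['a']
  else ans ++ [cs.getD i ' ']

def pvStepK (cs : List Char) (i : Nat) (k : Int) : Int :=
  if cs.getD i ' ' = 'z' ∧ (i : Int) = k then k - 1 else k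

-- A's while loop, i counting down from len-1 to 0
def pvLoopA (cs : List Char) : Nat → Int → List Char → List Char
  | 0, k, ans => pvStepAns cs 0 k ans
  | i + 1, k, ans => pvLoopA cs i (pvStepK cs (i + 1) k) (pvStepAns cs (i + 1) k ans)

def getStringVitaly (strS : String) : String :=
  let cs := strS.toList
  match cs.length with
  | 0 => String.ofList []                 -- empty: the loop never runs, ans = ''
  | n + 1 => String.ofList ((pvLoopA cs n (n : Int) []).reverse)   -- ans[::-1]

-- ===== PORT B =====
-- B's while loop: set trailing 'z's to 'a', return the list and the stop index (none = ran off the front)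
def pvBLoop : List Char → Nat → List Char × Option Nat
  | s, 0 => if s.getD 0 ' ' = 'z' then (s.set 0 'a', none) else (s, some 0)
  | s, j + 1 => if s.getD (j + 1) ' ' = 'z' then pvBLoop (s.set (j + 1) 'a') j else (s, some (j + 1))

def getStringVitaly_alt (strS : String) : String :=
  let s := strS.toList
  match s.length with
  | 0 => String.ofList s
  | n + 1 =>
    match pvBLoop s n with
    | (s', none) => String.ofList s'                             -- j < 0: no bump
    | (s', some j) => String.ofList (s'.set j (pvBump (s'.getD j ' ')))

-- ===== PRECONDITION & SPEC =====
def Spec_getStringVitaly (strS : String) (out : String) : Prop := out = getStringVitaly_alt strS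
instance (strS : String) (out : String) : Decidable (Spec_getStringVitaly strS out) := by unfold Spec_getStringVitaly; infer_instance

-- ===== CLAIM (what is proved, stated in full; the proofs are below) =====
def Claim_equal_getStringVitaly : Prop := ∀ (strS : String), Dom_getStringVitaly strS → Spec_getStringVitaly strS (getStringVitaly strS)

-- ===== LEMMAS AND PROOFS =====

-- common description of both programs, on the reversed character list:
-- leading (= trailing in the string) 'z's become 'a', the first non-'z' is bumped, the rest is kept
def pvSpecRev : List Char → List Char
  | [] => []
  | c :: rest => if c = 'z' then 'a' :: pvSpecRev rest else pvBump c :: rest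

def pvFinishB (r : List Char × Option Nat) : List Char :=
  match r.2 with
  | none => r.1
  | some j => r.1.set j (pvBump (r.1.getD j ' '))

theorem pvLoopA_zero (cs : List Char) (k : Int) (ans : List Char) :
    pvLoopA cs 0 k ans = pvStepAns cs 0 k ans := rfl

theorem pvLoopA_succ (cs : List Char) (i : Nat) (k : Int) (ans : List Char) :
    pvLoopA cs (i + 1) k ans
      = pvLoopA cs i (pvStepK cs (i + 1) k) (pvStepAns cs (i + 1) k ans) := rfl

theorem pvBLoop_zero (s : List Char) :
    pvBLoop s 0 = if s.getD 0 ' ' = 'z' then (s.set 0 'a', none) else (s, some 0) := rfl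

theorem pvBLoop_succ (s : List Char) (j : Nat) :
    pvBLoop s (j + 1)
      = if s.getD (j + 1) ' ' = 'z' then pvBLoop (s.set (j + 1) 'a') j
        else (s, some (j + 1)) := rfl

theorem pvSpecRev_cons (c : Char) (rest : List Char) :
    pvSpecRev (c :: rest) = if c = 'z' then 'a' :: pvSpecRev rest else pvBump c :: rest := rfl

theorem pvStepAns_ne (cs : List Char) (i : Nat) (k : Int) (ans : List Char)
    (h : ¬ (i : Int) = k) : pvStepAns cs i k ans = ans ++ [cs.getD i ' '] := by
  unfold pvStepAns
  rw [if_neg (fun hc => h hc.2), if_neg (fun hc => h hc.2)]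

theorem pvStepAns_z (cs : List Char) (i : Nat) (ans : List Char)
    (h : cs.getD i ' ' = 'z') : pvStepAns cs i (i : Int) ans = ans ++ ['a'] := by
  unfold pvStepAns
  rw [if_neg (fun hc => hc.1 h), if_pos ⟨h, rfl⟩]

theorem pvStepAns_nz (cs : List Char) (i : Nat) (ans : List Char)
    (h : ¬ cs.getD i ' ' = 'z') :
    pvStepAns cs i (i : Int) ans = ans ++ [pvBump (cs.getD i ' ')] := by
  unfold pvStepAns
  rw [if_pos ⟨h, rfl⟩]

theorem pvStepK_ne (cs : List Char) (i : Nat) (k : Int) (h : ¬ (i : Int) = k) :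
    pvStepK cs i k = k := by
  unfold pvStepK; rw [if_neg (fun hc => h hc.2)]

theorem pvStepK_z (cs : List Char) (i : Nat) (h : cs.getD i ' ' = 'z') :
    pvStepK cs i (i : Int) = (i : Int) - 1 := by
  unfold pvStepK; rw [if_pos ⟨h, rfl⟩]

theorem pvStepK_nz (cs : List Char) (i : Nat) (h : ¬ cs.getD i ' ' = 'z') :
    pvStepK cs i (i : Int) = (i : Int) := by
  unfold pvStepK; rw [if_neg (fun hc => h hc.1)]

theorem pvTakeSuccRev (l : List Char) (i : Nat) (h : i < l.length) :
    (l.take (i + 1)).reverse = l.getD i ' ' :: (l.take i).reverse := by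
  rw [List.getD_eq_getElem l ' ' h, List.take_add_one, List.getElem?_eq_getElem h]
  simp

-- copy phase of A: once i has fallen below indexCuoi, every character is copied verbatim
theorem pvCopyA (cs : List Char) :
    ∀ (i : Nat) (k : Int) (ans : List Char), (i : Int) < k → i < cs.length →
      pvLoopA cs i k ans = ans ++ (cs.take (i + 1)).reverse := by
  intro i
  induction i with
  | zero =>
    intro k ans hk hl
    rw [pvLoopA_zero, pvStepAns_ne cs 0 k ans (by omega), pvTakeSuccRev cs 0 hl]
    simp
  | succ i ih =>
    intro k ans hk hl
    have hne : ¬ ((i + 1 : Nat) : Int) = k := by omega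
    rw [pvLoopA_succ, pvStepAns_ne cs (i + 1) k ans hne, pvStepK_ne cs (i + 1) k hne,
      ih k _ (by push_cast at hk ⊢; omega) (by omega),
      pvTakeSuccRev cs (i + 1) hl]
    simp

theorem pvMainA (cs : List Char) :
    ∀ i ans, i < cs.length →
      pvLoopA cs i (i : Int) ans = ans ++ pvSpecRev ((cs.take (i + 1)).reverse) := by
  intro i
  induction i with
  | zero =>
    intro ans hl
    rw [pvTakeSuccRev cs 0 hl, pvLoopA_zero, pvSpecRev_cons]
    by_cases hz : cs.getD 0 ' ' = 'z'
    · rw [pvStepAns_z cs 0 ans hz, if_pos hz]; simp [pvSpecRev]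
    · rw [pvStepAns_nz cs 0 ans hz, if_neg hz]; simp
  | succ i ih =>
    intro ans hl
    rw [pvTakeSuccRev cs (i + 1) hl, pvLoopA_succ, pvSpecRev_cons]
    by_cases hz : cs.getD (i + 1) ' ' = 'z'
    · rw [pvStepAns_z cs (i + 1) ans hz, pvStepK_z cs (i + 1) hz,
        (by push_cast; ring : ((i + 1 : Nat) : Int) - 1 = (i : Int)),
        ih _ (by omega), if_pos hz]
      simp
    · rw [pvStepAns_nz cs (i + 1) ans hz, pvStepK_nz cs (i + 1) hz,
        pvCopyA cs i ((i + 1 : Nat) : Int) _ (by push_cast; omega) (by omega), if_neg hz]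
      simp

theorem pvMainB :
    ∀ j (s : List Char), j < s.length →
      pvFinishB (pvBLoop s j)
        = (pvSpecRev ((s.take (j + 1)).reverse)).reverse ++ s.drop (j + 1) := by
  intro j
  induction j with
  | zero =>
    intro s hl
    rw [pvTakeSuccRev s 0 hl, pvBLoop_zero]
    by_cases hz : s.getD 0 ' ' = 'z'
    · rw [if_pos hz]
      show s.set 0 'a' = _
      rw [List.set_eq_take_cons_drop _ hl, pvSpecRev_cons, if_pos hz]
      simp [pvSpecRev]
    · rw [if_neg hz]
      show s.set 0 (pvBump (s.getD 0 ' ')) = _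
      rw [List.set_eq_take_cons_drop _ hl, pvSpecRev_cons, if_neg hz]
      simp
  | succ j ih =>
    intro s hl
    rw [pvTakeSuccRev s (j + 1) hl, pvBLoop_succ]
    by_cases hz : s.getD (j + 1) ' ' = 'z'
    · rw [if_pos hz]
      have htake : (s.set (j + 1) 'a').take (j + 1) = s.take (j + 1) := by
        rw [List.take_set]
        exact List.set_eq_of_length_le (by simp only [List.length_take]; omega)
      have hdrop : (s.set (j + 1) 'a').drop (j + 1) = 'a' :: s.drop (j + 2) := by
        rw [List.drop_set, if_neg (lt_irrefl _)]
        simp only [Nat.sub_self]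
        rw [List.drop_eq_getElem_cons (show j + 1 < s.length by omega), List.set_cons_zero]
      rw [ih _ (by simp only [List.length_set]; omega), htake, hdrop,
        pvSpecRev_cons, if_pos hz]
      simp
    · rw [if_neg hz]
      show s.set (j + 1) (pvBump (s.getD (j + 1) ' ')) = _
      rw [List.set_eq_take_cons_drop _ hl, pvSpecRev_cons, if_neg hz]
      simp

-- ===== VERDICT (by name: the statement is the Claim_ definition above) =====
theorem getStringVitaly_spec : Claim_equal_getStringVitaly := by
  intro strS _
  unfold Spec_getStringVitaly getStringVitaly getStringVitaly_alt
  rcases strS.toList with _ | ⟨c, t⟩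
  · rfl
  · have hl : t.length < (c :: t).length := by simp
    have htake : (c :: t).take (t.length + 1) = c :: t := List.take_of_length_le (by simp)
    have hA := pvMainA (c :: t) t.length [] hl
    rw [htake, List.nil_append] at hA
    have hB := pvMainB t.length (c :: t) hl
    rw [htake, List.drop_eq_nil_of_le (by simp), List.append_nil] at hB
    show String.ofList ((pvLoopA (c :: t) t.length (t.length : Int) []).reverse)
      = (match pvBLoop (c :: t) t.length with
        | (s', none) => String.ofList s'
        | (s', some j) => String.ofList (s'.set j (pvBump (s'.getD j ' '))))
    have hmatch : (match pvBLoop (c :: t) t.length with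
        | (s', none) => String.ofList s'
        | (s', some j) => String.ofList (s'.set j (pvBump (s'.getD j ' '))))
        = String.ofList (pvFinishB (pvBLoop (c :: t) t.length)) := by
      rcases pvBLoop (c :: t) t.length with ⟨s', _ | _⟩ <;> simp [pvFinishB]
    rw [hA, hmatch, hB]
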